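-- pv_equiv track=rewrite | github.com/Skyparker0/AllLocalProgrammingProjects | Cool Projects/Helping Out Dad/Least Coins Problem.py | coinCombos
-- ===== SOURCE A (Python) =====
-- def coinCombos(N,start,end=None):
--     if end == None:
--         end = 101-N
--
--     if N == 1:
--         return [[i] for i in range(start, end+1)]
--
--     combos = []
--     for comboStart in range(start, end+1):
--         ends = coinCombos(N-1,comboStart+1,end+1)
--         combos.extend([[comboStart] + end for end in ends])
--     return combos
-- ===== SOURCE B (Python) =====
-- def coinCombos(N, start, end=None):
--     if end is None:
--         end = 101 - N
--     n = end + N - start  # pool size: the pool is range(start, end + N)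
--     if N > n:
--         return []  # pool too small, no N-combination exists
--     # table[r] = all strictly increasing r-combinations of the suffix of the
--     # pool processed so far (DP over the pool from the right, no recursion).
--     table = [[[]]] + [[] for _ in range(N)]
--     for i, x in enumerate(range(end + N - 1, start - 1, -1)):
--         # entries of size < N-(n-i-1) can no longer grow into an N-combination,
--         # so they are left untouched (they are never read again either)
--         lo = max(N - (n - i - 1), 1)
--         prev = table[lo - 1]
--         new_high = []
--         for t in table[lo:]:
--             new_high.append([[x] + c for c in prev] + t)
--             prev = t
--         table = table[:lo] + new_high
--     return table[N]
-- ===== Notes on version B (the rewrite author's own statement) =====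
-- stated objective: alternative
-- what changed: Replaces A's per-prefix recursion (recurse on N with shifting start/end bounds, extending an accumulator for each prefix element) by a non-recursive dynamic program: sweep the pool right-to-left maintaining a table of the r-combinations of the processed suffix (entries too small to ever grow into an N-combination are left untouched), sharing subresults instead of recomputing them per prefix.
import Mathlib
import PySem

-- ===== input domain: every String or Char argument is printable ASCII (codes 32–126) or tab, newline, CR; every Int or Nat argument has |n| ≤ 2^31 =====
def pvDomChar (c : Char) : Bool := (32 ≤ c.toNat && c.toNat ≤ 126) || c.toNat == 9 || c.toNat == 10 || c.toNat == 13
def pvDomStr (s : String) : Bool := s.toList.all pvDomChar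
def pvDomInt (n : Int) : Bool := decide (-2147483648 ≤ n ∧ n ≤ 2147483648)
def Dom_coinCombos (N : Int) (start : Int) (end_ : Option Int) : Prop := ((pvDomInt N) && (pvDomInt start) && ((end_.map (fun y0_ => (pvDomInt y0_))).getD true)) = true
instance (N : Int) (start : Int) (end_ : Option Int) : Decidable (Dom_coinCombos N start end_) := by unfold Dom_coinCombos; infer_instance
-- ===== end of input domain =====

-- B replaces A's per-prefix recursion by an iterative right-to-left DP table of suffix combinations (alternative algorithm, same output).

-- ===== PORT A =====
-- A recurses on N (depth N for N ≥ 1); the port uses N.toNat as fuel, exact on Pre_ (N ≥ 1).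
def coinCombosGo : Nat → Int → Int → Int → List (List Int)
  | 0, _, _, _ => []
  | fuel+1, N, start, end_ =>
    if N == 1 then
      (PySem.List.pyRange start (end_+1) 1).map (fun i => [i])
    else
      (PySem.List.pyRange start (end_+1) 1).foldl
        (fun combos comboStart =>
          combos ++ (coinCombosGo fuel (N-1) (comboStart+1) (end_+1)).map (fun en => [comboStart] ++ en))
        []

def coinCombos (N : Int) (start : Int) (end_ : Option Int) : List (List Int) :=
  let e := match end_ with | none => 101 - N | some v => v
  coinCombosGo N.toNat N start e

-- ===== PORT B =====
-- inner cascade: 'for t in table[lo:]: new_high.append([[x] + c for c in prev] + t); prev = t'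
def coinStepAux (x : Int) : List (List Int) → List (List (List Int)) → List (List (List Int))
  | _, [] => []
  | prev, t :: ts => ((prev.map (fun c => [x] ++ c)) ++ t) :: coinStepAux x t ts

-- one iteration of the outer loop; ix = (i, x) from enumerate
def coinStep (N n : Int) (table : List (List (List Int))) (ix : Int × Int) : List (List (List Int)) :=
  let lo := max (N - (n - ix.1 - 1)) 1
  let prev := PySem.List.pyGetD table (lo - 1) []
  PySem.List.slice table none (some lo) ++ coinStepAux ix.2 prev (PySem.List.slice table (some lo) none)

def coinCombos_alt (N : Int) (start : Int) (end_ : Option Int) : List (List Int) :=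
  let e := match end_ with | none => 101 - N | some v => v
  let n := e + N - start
  if N > n then []  -- pool too small, no N-combination exists
  else
    let table0 := [[([] : List Int)]] ++ List.replicate N.toNat []
    let table := (PySem.List.enumerate (PySem.List.pyRange (e + N - 1) (start - 1) (-1)) 0).foldl
      (coinStep N n) table0
    PySem.List.pyGetD table N []

-- ===== PRECONDITION & SPEC =====
-- Pre_ excludes exactly the inputs where A raises: for N ≤ 0 with a nonempty top-level range the
-- recursion never reaches its base case (RecursionError); N ≤ 0 with an empty range returns [].
def Pre_coinCombos (N : Int) (start : Int) (end_ : Option Int) : Prop :=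
  1 ≤ N ∨ (match end_ with | none => 101 - N | some v => v) < start
instance (N : Int) (start : Int) (end_ : Option Int) : Decidable (Pre_coinCombos N start end_) := by unfold Pre_coinCombos; infer_instance
def pvWitness_coinCombos : Int × Int × Option Int := (2, 1, some 3)

def Spec_coinCombos (N : Int) (start : Int) (end_ : Option Int) (out : List (List Int)) : Prop := out = coinCombos_alt N start end_
instance (N : Int) (start : Int) (end_ : Option Int) (out : List (List Int)) : Decidable (Spec_coinCombos N start end_ out) := by unfold Spec_coinCombos; infer_instance

-- ===== CLAIM (what is proved, stated in full; the proofs are below) =====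
def Claim_equal_coinCombos : Prop := ∀ (N : Int) (start : Int) (end_ : Option Int), Dom_coinCombos N start end_ → Pre_coinCombos N start end_ → Spec_coinCombos N start end_ (coinCombos N start end_)

-- ===== LEMMAS AND PROOFS =====

-- reference: lexicographic r-combinations of a pool (proof-only)
def combsR : Nat → List Int → List (List Int)
  | 0, _ => [[]]
  | _+1, [] => []
  | r+1, x :: xs => (combsR r xs).map (fun c => x :: c) ++ combsR (r+1) xs

lemma combsR_one (l : List Int) : combsR 1 l = l.map (fun x => [x]) := by
  induction l with
  | nil => rfl
  | cons x xs ih => simp [combsR, ih]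

lemma combsR_short : ∀ (l : List Int) (r : Nat), l.length < r → combsR r l = [] := by
  intro l
  induction l with
  | nil =>
    intro r h
    match r with
    | r+1 => rfl
  | cons x xs ih =>
    intro r h
    match r, h with
    | r+1, h =>
      simp only [combsR]
      rw [ih r (by simp at h; omega), ih (r+1) (by simp at h; omega)]
      simp

lemma combsR_flat (k : Nat) : ∀ (m : Nat) (start b : Int), (b - start).toNat = m →
    combsR (k+1) (PySem.List.pyRange start b 1) =
      (PySem.List.pyRange start (b - k) 1).flatMap
        (fun c => (combsR k (PySem.List.pyRange (c+1) b 1)).map (fun en => c :: en)) := by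
  intro m
  induction m with
  | zero =>
    intro start b hm
    have hba : b ≤ start := by omega
    rw [PySem.List.pyRange_one_eq_nil hba,
        PySem.List.pyRange_one_eq_nil (show b - (k : Int) ≤ start by omega)]
    rfl
  | succ m ih =>
    intro start b hm
    have hlt : start < b := by omega
    rw [PySem.List.pyRange_one_cons hlt]
    simp only [combsR]
    rw [ih (start+1) b (by omega)]
    by_cases hc : start < b - (k : Int)
    · rw [PySem.List.pyRange_one_cons hc, List.flatMap_cons]
    · rw [PySem.List.pyRange_one_eq_nil (show b - (k : Int) ≤ start by omega),
          PySem.List.pyRange_one_eq_nil (show b - (k : Int) ≤ start + 1 by omega)]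
      rw [combsR_short _ k (by rw [PySem.List.length_pyRange_one]; omega)]
      simp

lemma go_succ (fuel : Nat) (N start end_ : Int) :
    coinCombosGo (fuel+1) N start end_ =
      (if N == 1 then
        (PySem.List.pyRange start (end_+1) 1).map (fun i => [i])
      else
        (PySem.List.pyRange start (end_+1) 1).foldl
          (fun combos comboStart =>
            combos ++ (coinCombosGo fuel (N-1) (comboStart+1) (end_+1)).map (fun en => [comboStart] ++ en))
          []) := rfl

lemma go_eq (n : Nat) : ∀ (start e : Int),
    coinCombosGo (n+1) ((n : Int)+1) start e = combsR (n+1) (PySem.List.pyRange start (e + ((n : Int)+1)) 1) := by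
  induction n with
  | zero =>
    intro start e
    simp only [coinCombosGo, Nat.cast_zero, zero_add]
    rw [if_pos (by decide)]
    rw [combsR_one]
  | succ n ih =>
    intro start e
    rw [go_succ]
    rw [if_neg (by simp only [beq_iff_eq]; push_cast; omega)]
    rw [PySem.List.foldl_append_eq_flatMap]
    have hrec : ∀ c : Int, coinCombosGo (n+1) (((n+1 : Nat) : Int) + 1 - 1) (c+1) (e+1)
        = combsR (n+1) (PySem.List.pyRange (c+1) (e + (((n+1 : Nat) : Int) + 1)) 1) := by
      intro c
      rw [show ((((n+1 : Nat) : Int)) + 1 - 1) = (n : Int) + 1 by push_cast; ring]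
      rw [ih (c+1) (e+1)]
      congr 2
      push_cast
      ring
    simp only [hrec, List.nil_append, List.singleton_append]
    rw [combsR_flat (n+1) ((e + (((n+1 : Nat) : Int) + 1)) - start).toNat start (e + (((n+1 : Nat) : Int) + 1)) rfl]
    congr 1
    push_cast
    ring_nf

lemma coinStepAux_length (x : Int) :
    ∀ (p : List (List Int)) (l : List (List (List Int))), (coinStepAux x p l).length = l.length := by
  intro p l
  induction l generalizing p with
  | nil => rfl
  | cons t ts ih => simp [coinStepAux, ih]

lemma coinStepAux_getD (x : Int) :
    ∀ (l : List (List (List Int))) (p : List (List Int)) (j : Nat), j < l.length →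
      (coinStepAux x p l).getD j [] = ((p :: l).getD j []).map (fun c => [x] ++ c) ++ l.getD j [] := by
  intro l
  induction l with
  | nil => intro p j h; simp at h
  | cons t ts ih =>
    intro p j h
    cases j with
    | zero => rfl
    | succ j =>
      simp only [coinStepAux, List.getD_cons_succ]
      exact ih t j (by simp at h; omega)

lemma getD_drop' (t : List (List (List Int))) (k j : Nat) :
    (t.drop k).getD j [] = t.getD (k+j) [] := by
  rw [List.getD_eq_getElem?_getD, List.getD_eq_getElem?_getD, List.getElem?_drop]

lemma getD_rep : ∀ (m j : Nat), (List.replicate m ([] : List (List Int))).getD j [] = [] := by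
  intro m
  induction m with
  | zero => intro j; rfl
  | succ m ih =>
    intro j
    cases j with
    | zero => rfl
    | succ j => simpa [List.replicate_succ] using ih j

lemma t0_getD (N : Int) (r : Nat) (hr : r ≤ N.toNat) :
    ([[([] : List Int)]] ++ List.replicate N.toNat []).getD r [] = combsR r [] := by
  cases r with
  | zero => rfl
  | succ r =>
    rw [List.getD_append_right _ _ _ _ (by simp)]
    simpa [combsR] using getD_rep N.toNat r

-- loop invariant: entries of index r ≥ N - (n - k) (and entry 0) hold the r-combinations of the
-- processed suffix pyRange (b-k) b 1 of the pool
def coinInv (N n b : Int) (k : Nat) (t : List (List (List Int))) : Prop :=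
  t.length = N.toNat + 1 ∧
  ∀ r : Nat, r ≤ N.toNat → (r = 0 ∨ N - (n - k) ≤ (r : Int)) →
    t.getD r [] = combsR r (PySem.List.pyRange (b - k) b 1)

lemma coinInv_zero (N n b : Int) : coinInv N n b 0 ([[([] : List Int)]] ++ List.replicate N.toNat []) := by
  refine ⟨by simp, ?_⟩
  intro r hr _
  rw [PySem.List.pyRange_one_eq_nil (by simp)]
  exact t0_getD N r hr

lemma coinInv_step (N n b : Int) (hN : 1 ≤ N) (k : Nat) (hk : (k : Int) < n)
    (t : List (List (List Int))) (ht : coinInv N n b k t) :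
    coinInv N n b (k+1) (coinStep N n t ((k : Int), b - 1 - (k : Int))) := by
  obtain ⟨hlen, hinv⟩ := ht
  have hL : 1 ≤ N.toNat := by omega
  unfold coinInv
  simp only [coinStep]
  set lo := max (N - (n - (k : Int) - 1)) 1 with hlo
  have hlo1 : 1 ≤ lo := le_max_right _ _
  have hloN : lo ≤ N := by
    have h1 : N - (n - (k : Int) - 1) ≤ N := by omega
    have := max_le h1 hN
    omega
  have hlotL : lo.toNat ≤ N.toNat := by omega
  rw [PySem.List.slice_to t (by omega), PySem.List.slice_from t (by omega)]
  have htake : (t.take lo.toNat).length = lo.toNat := by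
    rw [List.length_take]; omega
  constructor
  · rw [List.length_append, htake, coinStepAux_length, List.length_drop]; omega
  · intro r hr hcl
    have hS : PySem.List.pyRange (b - ((k : Nat) + 1 : Nat)) b 1 =
        (b - 1 - (k : Int)) :: PySem.List.pyRange (b - (k : Nat)) b 1 := by
      rw [show (b - (((k : Nat) + 1 : Nat) : Int)) = b - 1 - (k : Int) by push_cast; ring]
      rw [PySem.List.pyRange_one_cons (by omega)]
      rw [show (b - 1 - (k : Int) + 1) = b - ((k : Nat) : Int) by ring]
    by_cases hr0 : r = 0
    · subst hr0
      rw [List.getD_append _ _ _ _ (by omega)]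
      have h0 : (t.take lo.toNat).getD 0 [] = t.getD 0 [] := by
        rw [List.getD_eq_getElem?_getD, List.getD_eq_getElem?_getD, List.getElem?_take_of_lt (by omega)]
      rw [h0, hinv 0 (by omega) (Or.inl rfl)]
      simp [combsR]
    · -- r ≥ 1; the clause forces r ≥ lo, so the entry lies in the updated cascade
      have hthr : N - (n - (((k : Nat) + 1 : Nat) : Int)) ≤ (r : Int) := by
        rcases hcl with h | h
        · exact absurd h hr0
        · exact h
      have hrlo : lo ≤ (r : Int) := by
        have h1 : 1 ≤ (r : Int) := by
          have : 1 ≤ r := Nat.one_le_iff_ne_zero.mpr hr0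
          omega
        have h2 : N - (n - (k : Int) - 1) ≤ (r : Int) := by push_cast at hthr; omega
        omega
      have hrlon : lo.toNat ≤ r := by omega
      rw [List.getD_append_right _ _ _ _ (by omega), htake]
      have hjlt : r - lo.toNat < (t.drop lo.toNat).length := by
        rw [List.length_drop]; omega
      rw [coinStepAux_getD _ _ _ _ hjlt]
      have hprev : ((PySem.List.pyGetD t (lo - 1) []) :: t.drop lo.toNat).getD (r - lo.toNat) []
          = t.getD (r - 1) [] := by
        rcases Nat.eq_zero_or_pos (r - lo.toNat) with hz | hp
        · rw [hz, List.getD_cons_zero,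
              PySem.List.pyGetD_eq_getElem t [] (by omega) (by rw [hlen]; push_cast; omega)]
          simp only [show (lo - 1).toNat = r - 1 from by omega]
          exact (List.getD_eq_getElem t [] (by omega)).symm
        · rw [show r - lo.toNat = (r - lo.toNat - 1) + 1 by omega, List.getD_cons_succ, getD_drop']
          congr 1
          omega
      have hcur : (t.drop lo.toNat).getD (r - lo.toNat) [] = t.getD r [] := by
        rw [getD_drop']
        congr 1
        omega
      rw [hprev, hcur]
      obtain ⟨r', rfl⟩ : ∃ r', r = r' + 1 := ⟨r - 1, by omega⟩
      rw [hinv (r'+1) hr (Or.inr (by push_cast at hthr ⊢; omega))]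
      rw [show r' + 1 - 1 = r' from rfl]
      rw [hinv r' (by omega) (by
        rcases Nat.eq_zero_or_pos r' with hz | hp
        · exact Or.inl hz
        · exact Or.inr (by push_cast at hthr ⊢; omega))]
      rw [hS]
      simp [combsR]

lemma coinInv_loop (N n b : Int) (hN : 1 ≤ N) : ∀ (m k : Nat), ((k : Int) + m ≤ n) →
    ∀ t, coinInv N n b k t →
      coinInv N n b (k+m)
        (((List.range' k m).map (fun (j : Nat) => ((j : Int), b - 1 - (j : Int)))).foldl (coinStep N n) t) := by
  intro m
  induction m with
  | zero => intro k _ t ht; simpa using ht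
  | succ m ih =>
    intro k hkm t ht
    simp only [List.range'_succ, List.map_cons, List.foldl_cons]
    have h := ih (k+1) (by push_cast at hkm ⊢; omega) _ (coinInv_step N n b hN k (by push_cast at hkm; omega) t ht)
    rw [show k + (m+1) = (k+1) + m by omega]
    exact h

lemma enum_eq (b : Int) : ∀ (m k : Nat),
    PySem.List.enumerate ((List.range' k m).map (fun (j : Nat) => b - 1 - (j : Int))) (k : Int) =
      (List.range' k m).map (fun (j : Nat) => ((j : Int), b - 1 - (j : Int))) := by
  intro m
  induction m with
  | zero => intro k; rfl
  | succ m ih =>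
    intro k
    simp only [List.range'_succ, List.map_cons, PySem.List.enumerate_cons]
    rw [show ((k : Int) + 1) = (((k+1 : Nat) : Int)) by push_cast; ring]
    rw [ih (k+1)]

lemma enum_eq0 (b : Int) (m : Nat) :
    PySem.List.enumerate ((List.range' 0 m).map (fun (j : Nat) => b - 1 - (j : Int))) 0 =
      (List.range' 0 m).map (fun (j : Nat) => ((j : Int), b - 1 - (j : Int))) := by
  simpa using enum_eq b m 0

lemma alt_small (N start e : Int) (h : e < start) : coinCombos_alt N start (some e) = [] := by
  show (if N > (match some e with | none => 101 - N | some v => v) + N - start then ([] : List (List Int))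
        else PySem.List.pyGetD _ N []) = _
  rw [show (match some e with | none => 101 - N | some v => v) = e from rfl, if_pos (by omega)]

lemma alt_eq (N start e : Int) (hN : 1 ≤ N) :
    coinCombos_alt N start (some e) = combsR N.toNat (PySem.List.pyRange start (e + N) 1) := by
  show (if N > (match some e with | none => 101 - N | some v => v) + N - start then ([] : List (List Int))
        else PySem.List.pyGetD _ N []) = _
  rw [show (match some e with | none => 101 - N | some v => v) = e from rfl]
  by_cases hng : N > e + N - start
  · rw [if_pos hng]
    symm
    apply combsR_short
    rw [PySem.List.length_pyRange_one]
    omega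
  · rw [if_neg hng]
    rw [PySem.List.pyRange_neg_one,
        show (e + N - 1 - (start - 1)) = e + N - start by ring,
        List.range_eq_range', enum_eq0 (e + N) ((e + N - start).toNat)]
    obtain ⟨_, h2⟩ := coinInv_loop N (e + N - start) (e + N) hN (e + N - start).toNat 0
      (by push_cast; omega) _ (coinInv_zero N (e + N - start) (e + N))
    rw [PySem.List.pyGetD_of_nonneg _ _ (by omega)]
    rw [show (0 + (e + N - start).toNat) = (e + N - start).toNat from by omega] at h2
    rw [h2 N.toNat le_rfl (Or.inr (by omega))]
    congr 2
    omega

-- ===== VERDICT (by name: the statement is the Claim_ definition above) =====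
theorem coinCombos_spec : Claim_equal_coinCombos := by
  intro N start end_ _ hpre
  unfold Spec_coinCombos
  by_cases hN : 1 ≤ N
  case neg =>
    have hz : N.toNat = 0 := by omega
    cases end_ with
    | none =>
      have he : 101 - N < start := by
        unfold Pre_coinCombos at hpre
        rcases hpre with h | h
        · omega
        · exact h
      show coinCombosGo N.toNat N start (101 - N) = coinCombos_alt N start none
      rw [show coinCombos_alt N start none = coinCombos_alt N start (some (101 - N)) from rfl,
          alt_small N start (101 - N) he, hz]
      rfl
    | some e =>
      have he : e < start := by
        unfold Pre_coinCombos at hpre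
        rcases hpre with h | h
        · omega
        · exact h
      show coinCombosGo N.toNat N start e = coinCombos_alt N start (some e)
      rw [alt_small N start e he, hz]
      rfl
  case pos =>
    obtain ⟨n, rfl⟩ : ∃ n : Nat, N = (n : Int) + 1 := ⟨(N - 1).toNat, by omega⟩
    have ht : ((n : Int) + 1).toNat = n + 1 := by omega
    cases end_ with
    | none =>
      show coinCombosGo ((n : Int) + 1).toNat ((n : Int) + 1) start (101 - ((n : Int) + 1)) = _
      have h1 : coinCombos_alt ((n : Int) + 1) start none
          = coinCombos_alt ((n : Int) + 1) start (some (101 - ((n : Int) + 1))) := rfl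
      rw [h1, alt_eq _ start _ hN, ht]
      exact go_eq n start (101 - ((n : Int) + 1))
    | some e =>
      show coinCombosGo ((n : Int) + 1).toNat ((n : Int) + 1) start e = _
      rw [alt_eq _ start e hN, ht]
      exact go_eq n start e
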